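-- pv_equiv track=rewrite | github.com/oneoldfriend/nips-dcvrptw | tools.py | pick_out_requests_from_solution
-- ===== SOURCE A (Python) =====
-- def pick_out_requests_from_solution(solution, requests):
--     for postponed_request in requests:
--         for route in solution:
--             if postponed_request in route:
--                 route.remove(postponed_request)
--                 continue
--     while [] in solution:
--         solution.remove([])
--     return solution
-- ===== SOURCE B (Python) =====
-- def pick_out_requests_from_solution(solution, requests):
--     counts = {}
--     for r in requests:
--         counts[r] = counts.get(r, 0) + 1
--     for route in solution:
--         remaining = counts.copy()
--         keep = []
--         for x in route:
--             c = remaining.get(x, 0)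
--             if c > 0:
--                 remaining[x] = c - 1
--             else:
--                 keep.append(x)
--         route[:] = keep
--     solution[:] = [r for r in solution if r]
--     return solution
-- ===== Notes on version B (the rewrite author's own statement) =====
-- stated objective: alternative
-- what changed: Replaces the per-request rescans with repeated list.remove by a count table built once from requests and a single keep-pass over each route (then one filter for empty routes), preserving A's in-place mutation via route[:]/solution[:].
import Mathlib
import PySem

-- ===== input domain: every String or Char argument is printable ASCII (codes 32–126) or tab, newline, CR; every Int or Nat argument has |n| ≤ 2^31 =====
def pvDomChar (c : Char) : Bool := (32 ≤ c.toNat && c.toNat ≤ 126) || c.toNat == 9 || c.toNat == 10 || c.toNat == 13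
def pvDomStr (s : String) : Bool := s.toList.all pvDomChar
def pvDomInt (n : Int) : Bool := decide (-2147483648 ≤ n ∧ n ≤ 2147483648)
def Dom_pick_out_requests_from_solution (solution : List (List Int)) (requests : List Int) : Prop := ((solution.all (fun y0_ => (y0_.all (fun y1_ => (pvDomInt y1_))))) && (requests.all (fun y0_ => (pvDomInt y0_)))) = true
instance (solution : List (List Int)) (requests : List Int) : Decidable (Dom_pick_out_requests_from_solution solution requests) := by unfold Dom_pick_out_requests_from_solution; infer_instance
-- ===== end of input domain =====

-- B replaces A's per-request rescans with list.remove by a count table built once from requests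
-- and one keep-pass per route ('alternative'/faster algorithm); both Pythons mutate solution in
-- place identically (route[:]/solution[:]); the equivalence proved here is about the return value.


-- ===== PORT A =====
-- 'if postponed_request in route: route.remove(postponed_request)'
def pvCondRemove (route : List Int) (r : Int) : List Int :=
  if r ∈ route then (PySem.List.remove? route r).getD route else route

-- 'while [] in solution: solution.remove([])'
def pvDropEmptyLoop (sol : List (List Int)) : List (List Int) :=
  if h : [] ∈ sol then pvDropEmptyLoop ((PySem.List.remove? sol ([] : List Int)).getD sol) else sol
termination_by sol.length
decreasing_by
  rw [PySem.List.remove?_eq_some_erase sol ([] : List Int) h, Option.getD_some]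
  have hp : 0 < sol.length := List.length_pos_of_mem h
  rw [List.length_erase_of_mem h]; omega

def pick_out_requests_from_solution (solution : List (List Int)) (requests : List Int) : List (List Int) :=
  pvDropEmptyLoop
    (requests.foldl (fun sol r => sol.map (fun route => pvCondRemove route r)) solution)

-- ===== PORT B =====
-- the inner keep-pass: 'remaining = counts.copy(); keep = []; for x in route: …; route[:] = keep'
def pvRouteKeep (counts : PySem.Dict Int Int) (route : List Int) : List Int :=
  (route.foldl
    (fun (st : List Int × PySem.Dict Int Int) x =>
      let c := st.2.getD x 0
      if c > 0 then (st.1, st.2.insert x (c - 1)) else (st.1 ++ [x], st.2))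
    (([] : List Int), counts)).1

def pick_out_requests_from_solution_alt (solution : List (List Int)) (requests : List Int) : List (List Int) :=
  let counts := requests.foldl (fun d r => d.insert r (d.getD r 0 + 1)) PySem.Dict.empty
  (solution.map (fun route => pvRouteKeep counts route)).filter (fun r => !r.isEmpty)

-- ===== PRECONDITION & SPEC =====
def Spec_pick_out_requests_from_solution (solution : List (List Int)) (requests : List Int) (out : List (List Int)) : Prop := out = pick_out_requests_from_solution_alt solution requests
instance (solution : List (List Int)) (requests : List Int) (out : List (List Int)) : Decidable (Spec_pick_out_requests_from_solution solution requests out) := by unfold Spec_pick_out_requests_from_solution; infer_instance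

-- ===== CLAIM (what is proved, stated in full; the proofs are below) =====
def Claim_equal_pick_out_requests_from_solution : Prop := ∀ (solution : List (List Int)) (requests : List Int), Dom_pick_out_requests_from_solution solution requests → Spec_pick_out_requests_from_solution solution requests (pick_out_requests_from_solution solution requests)

-- ===== LEMMAS AND PROOFS =====

-- A's conditional remove is exactly List.erase (erase is the identity when the element is absent).
theorem pvCondRemove_eq_erase (route : List Int) (r : Int) : pvCondRemove route r = route.erase r := by
  unfold pvCondRemove
  by_cases h : r ∈ route
  · rw [if_pos h, PySem.List.remove?_eq_some_erase route r h, Option.getD_some]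
  · rw [if_neg h, List.erase_of_not_mem h]

-- A's outer loop (mapping every route for each request) as a per-route fold.
theorem foldl_map_swap (reqs : List Int) (sol : List (List Int)) :
    reqs.foldl (fun s r => s.map (fun route => pvCondRemove route r)) sol
      = sol.map (fun route => reqs.foldl (fun rt r => pvCondRemove rt r) route) := by
  induction reqs generalizing sol with
  | nil => simp
  | cons r rs ih =>
      simp only [List.foldl_cons, ih, List.map_map]
      rfl

-- functional model of B's keep-pass: skip x while its remaining count is positive
def pvKeepFun : List Int → (Int → Int) → List Int
  | [], _ => []
  | x :: xs, m =>
      if 0 < m x then pvKeepFun xs (fun v => if v = x then m v - 1 else m v)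
      else x :: pvKeepFun xs m

theorem pvRouteKeep_loop (route : List Int) :
    ∀ (acc : List Int) (d : PySem.Dict Int Int),
      (route.foldl
        (fun (st : List Int × PySem.Dict Int Int) x =>
          let c := st.2.getD x 0
          if c > 0 then (st.1, st.2.insert x (c - 1)) else (st.1 ++ [x], st.2))
        (acc, d)).1 = acc ++ pvKeepFun route (fun v => d.getD v 0) := by
  induction route with
  | nil => intro acc d; simp [pvKeepFun]
  | cons x xs ih =>
      intro acc d
      simp only [List.foldl_cons, pvKeepFun]
      by_cases h : 0 < d.getD x 0
      · rw [if_pos h, if_pos h, ih]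
        congr 1
        congr 1
        funext v
        rw [PySem.Dict.getD_insert]
        by_cases hv : v = x
        · subst hv; simp
        · simp [hv]
      · rw [if_neg h, if_neg h, ih, List.append_assoc]
        rfl

theorem pvRouteKeep_eq (counts : PySem.Dict Int Int) (route : List Int) :
    pvRouteKeep counts route = pvKeepFun route (fun v => counts.getD v 0) := by
  unfold pvRouteKeep
  rw [pvRouteKeep_loop route [] counts, List.nil_append]

theorem pvKeepFun_zero (route : List Int) (m : Int → Int) (hm : ∀ v, ¬ 0 < m v) :
    pvKeepFun route m = route := by
  induction route with
  | nil => rfl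
  | cons x xs ih => simp [pvKeepFun, hm x, ih]

-- erasing the first occurrence of r from the kept list = keeping with one more budgeted copy of r
theorem pvKeepFun_erase (route : List Int) :
    ∀ (m : Int → Int) (r : Int), (∀ v, 0 ≤ m v) →
      (pvKeepFun route m).erase r = pvKeepFun route (fun v => if v = r then m v + 1 else m v) := by
  induction route with
  | nil => intro m r _; rfl
  | cons x xs ih =>
      intro m r hm
      simp only [pvKeepFun]
      by_cases hx : 0 < m x
      · rw [if_pos hx]
        have hx' : 0 < (if x = r then m x + 1 else m x) := by split <;> omega
        rw [if_pos hx']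
        rw [ih _ r (by intro v; by_cases hv : v = x <;> simp [hv] <;> [omega; exact hm v])]
        congr 1
        funext v
        by_cases hvx : v = x <;> by_cases hvr : v = r <;> simp [hvx, hvr] <;> omega
      · rw [if_neg hx]
        by_cases hxr : x = r
        · subst hxr
          have h0 : m x = 0 := le_antisymm (by omega) (hm x)
          rw [List.erase_cons_head]
          have h1 : 0 < (if x = x then m x + 1 else m x) := by simp; omega
          rw [if_pos h1]
          congr 1
          funext v
          by_cases hv : v = x <;> simp [hv, h0]
        · rw [List.erase_cons_tail (by simp [hxr])]
          have h1 : ¬ 0 < (if x = r then m x + 1 else m x) := by rw [if_neg hxr]; exact hx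
          rw [if_neg h1, ih m r hm]

-- A's whole removal phase on one route = B's keep-pass with the multiset of requests
theorem route_phase_eq (reqs : List Int) (route : List Int) :
    reqs.foldl (fun rt r => pvCondRemove rt r) route
      = pvKeepFun route (fun v => (reqs.count v : Int)) := by
  induction reqs using List.reverseRecOn with
  | nil =>
      simp only [List.foldl_nil]
      rw [pvKeepFun_zero route _ (by intro v; simp)]
  | append_singleton rs r ih =>
      rw [List.foldl_append, List.foldl_cons, List.foldl_nil, ih, pvCondRemove_eq_erase,
        pvKeepFun_erase route _ r (by intro v; positivity)]
      congr 1
      funext v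
      by_cases hv : v = r
      · simp [hv, List.count_append]
      · simp [hv, List.count_append, Ne.symm hv]

-- B's counts dict counts requests
theorem counts_getD (reqs : List Int) (v : Int) :
    (reqs.foldl (fun d r => d.insert r (d.getD r 0 + 1)) PySem.Dict.empty).getD v 0
      = (reqs.count v : Int) := by
  rw [PySem.Dict.getD_foldl_insert_add_one]
  simp

-- helper: erasing an element the filter drops anyway does not change the filter
theorem filter_erase_nil (sol : List (List Int)) :
    (sol.erase ([] : List Int)).filter (fun r => !r.isEmpty) = sol.filter (fun r => !r.isEmpty) := by
  induction sol with
  | nil => rfl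
  | cons x xs ih =>
      by_cases hx : x = ([] : List Int)
      · subst hx; simp [List.erase_cons_head]
      · rw [List.erase_cons_tail (by simpa using hx)]
        simp only [List.filter_cons, ih]

-- A's while-loop removes exactly the empty routes, in order
theorem pvDropEmptyLoop_eq_filter (sol : List (List Int)) :
    pvDropEmptyLoop sol = sol.filter (fun r => !r.isEmpty) := by
  fun_induction pvDropEmptyLoop sol with
  | case1 sol h ih =>
      rw [ih, PySem.List.remove?_eq_some_erase sol ([] : List Int) h,
        Option.getD_some, filter_erase_nil]
  | case2 sol h =>
      refine (List.filter_eq_self.mpr ?_).symm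
      intro r hr
      have hne : r ≠ [] := fun he => h (he ▸ hr)
      simp [hne]

-- ===== VERDICT (by name: the statement is the Claim_ definition above) =====
theorem pick_out_requests_from_solution_spec : Claim_equal_pick_out_requests_from_solution := by
  intro solution requests _
  unfold Spec_pick_out_requests_from_solution
  unfold pick_out_requests_from_solution pick_out_requests_from_solution_alt
  rw [foldl_map_swap, pvDropEmptyLoop_eq_filter]
  congr 1
  apply List.map_congr_left
  intro route _
  rw [route_phase_eq, pvRouteKeep_eq]
  have hc : (fun v => (requests.foldl (fun d r => d.insert r (d.getD r 0 + 1))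
      PySem.Dict.empty).getD v 0) = (fun v => ((requests.count v : Nat) : Int)) :=
    funext (counts_getD requests)
  rw [hc]
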